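-- pv_equiv track=rewrite | github.com/MontagueM/DestinyMapmining | Good Python Files/model_unpacker.py | adjust_faces_data
-- ===== SOURCE A (Python) =====
-- def adjust_faces_data(faces_data, max_vert_used):
--     new_faces_data = []
--     all_v = []
--     for face in faces_data:
--         for v in face:
--             all_v.append(v)
--     starting_face_number = min(all_v) -1
--     all_v = []
--     for face in faces_data:
--         new_face = []
--         for v in face:
--             new_face.append(v - starting_face_number + max_vert_used)
--             all_v.append(v - starting_face_number + max_vert_used)
--         new_faces_data.append(new_face)
--     return new_faces_data, max(all_v)
-- ===== SOURCE B (Python) =====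
-- def adjust_faces_data(faces_data, max_vert_used):
--     ordered = sorted(v for face in faces_data for v in face)
--     offset = max_vert_used + 1 - ordered[0]
--     return [[v + offset for v in face] for face in faces_data], ordered[-1] + offset
-- ===== Notes on version B (the rewrite author's own statement) =====
-- stated objective: alternative
-- what changed: B sorts the flattened vertices once and reads the extremes off the ends of the sorted list (ordered[0], ordered[-1]), folds the whole shift into a single additive offset max_vert_used + 1 - ordered[0], and builds the output with a nested comprehension; A makes two explicit append-accumulator passes, computes min(all_v) halfway, and re-scans a rebuilt all_v list with max.
import Mathlib
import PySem

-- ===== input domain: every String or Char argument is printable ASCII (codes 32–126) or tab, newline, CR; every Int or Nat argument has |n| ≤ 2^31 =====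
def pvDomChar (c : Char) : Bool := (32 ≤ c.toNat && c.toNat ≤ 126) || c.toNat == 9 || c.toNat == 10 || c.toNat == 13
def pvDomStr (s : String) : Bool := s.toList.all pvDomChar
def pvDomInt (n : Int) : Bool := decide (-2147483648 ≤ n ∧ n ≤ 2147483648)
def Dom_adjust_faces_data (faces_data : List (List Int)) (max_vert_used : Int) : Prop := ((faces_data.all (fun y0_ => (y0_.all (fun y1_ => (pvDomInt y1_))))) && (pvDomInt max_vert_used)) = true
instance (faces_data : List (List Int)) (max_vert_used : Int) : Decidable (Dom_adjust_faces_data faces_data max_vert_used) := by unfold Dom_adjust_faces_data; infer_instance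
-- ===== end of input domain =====

-- B sorts the flattened vertices once and reads both extremes off the ends of the sorted
-- list, replacing A's two accumulator passes and min/max scans (objective: alternative).

-- ===== PORT A =====
def adjust_faces_data (faces_data : List (List Int)) (max_vert_used : Int) : List (List Int) × Int :=
  -- first loop pass: all_v collects every vertex
  let all_v := faces_data.foldl (fun acc face => face.foldl (fun a v => a ++ [v]) acc) ([] : List Int)
  match PySem.List.min? all_v (fun x => x) with   -- min(all_v); none = ValueError, excluded by Pre_
  | none => ([], 0)
  | some mn =>
    let starting_face_number := mn - 1
    -- second loop pass: builds new_faces_data and rebuilds all_v with the shifted values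
    let st := faces_data.foldl
      (fun (acc : List (List Int) × List Int) face =>
        let nf := face.foldl
          (fun (p : List Int × List Int) v =>
            (p.1 ++ [v - starting_face_number + max_vert_used],
             p.2 ++ [v - starting_face_number + max_vert_used]))
          (([] : List Int), acc.2)
        (acc.1 ++ [nf.1], nf.2))
      (([] : List (List Int)), ([] : List Int))
    (st.1, (PySem.List.max? st.2 (fun x => x)).getD 0)   -- max(all_v); nonempty whenever min succeeded

-- ===== PORT B =====
def adjust_faces_data_alt (faces_data : List (List Int)) (max_vert_used : Int) : List (List Int) × Int :=
  let ordered := PySem.List.sorted (faces_data.flatMap id) (fun x => x) false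
  match PySem.List.pyGet? ordered 0, PySem.List.pyGet? ordered (-1) with
  | some lo, some hi =>
    let offset := max_vert_used + 1 - lo
    (faces_data.map (fun face => face.map (fun v => v + offset)), hi + offset)
  | _, _ => ([], 0)   -- no vertices: Python raises IndexError, excluded by Pre_

-- ===== PRECONDITION & SPEC =====
-- Pre_ excludes exactly the inputs with no vertices at all, where A's min() raises ValueError
-- (and B's ordered[0] raises IndexError).
def Pre_adjust_faces_data (faces_data : List (List Int)) (_max_vert_used : Int) : Prop :=
  faces_data.flatMap id ≠ []
instance (faces_data : List (List Int)) (max_vert_used : Int) : Decidable (Pre_adjust_faces_data faces_data max_vert_used) := by unfold Pre_adjust_faces_data; infer_instance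

def pvWitness_adjust_faces_data : List (List Int) × Int := ([[1, 2, 3], [4, 5]], 10)

def Spec_adjust_faces_data (faces_data : List (List Int)) (max_vert_used : Int) (out : List (List Int) × Int) : Prop := out = adjust_faces_data_alt faces_data max_vert_used
instance (faces_data : List (List Int)) (max_vert_used : Int) (out : List (List Int) × Int) : Decidable (Spec_adjust_faces_data faces_data max_vert_used out) := by unfold Spec_adjust_faces_data; infer_instance

-- ===== CLAIM =====
def Claim_equal_adjust_faces_data : Prop := ∀ (faces_data : List (List Int)) (max_vert_used : Int), Dom_adjust_faces_data faces_data max_vert_used → Pre_adjust_faces_data faces_data max_vert_used → Spec_adjust_faces_data faces_data max_vert_used (adjust_faces_data faces_data max_vert_used)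

-- ===== LEMMAS AND PROOFS =====

-- A's first loop pass collects exactly the flattened vertex list.
theorem pv_allv_eq (faces_data : List (List Int)) (acc : List Int) :
    faces_data.foldl (fun acc face => face.foldl (fun a v => a ++ [v]) acc) acc
      = acc ++ faces_data.flatMap id := by
  induction faces_data generalizing acc with
  | nil => simp
  | cons f t ih =>
    rw [List.foldl_cons, PySem.List.foldl_append_singleton_eq_self, ih]
    simp

-- A's inner second-pass loop: pair-state fold builds (mapped face, acc2 ++ mapped face).
theorem pv_inner_eq (face : List Int) (g : Int → Int) (a1 a2 : List Int) :
    face.foldl (fun (p : List Int × List Int) v => (p.1 ++ [g v], p.2 ++ [g v])) (a1, a2)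
      = (a1 ++ face.map g, a2 ++ face.map g) := by
  induction face generalizing a1 a2 with
  | nil => simp
  | cons x t ih => simp [List.foldl_cons, ih]

-- A's outer second-pass loop.
theorem pv_outer_eq (faces_data : List (List Int)) (g : Int → Int)
    (a1 : List (List Int)) (a2 : List Int) :
    faces_data.foldl
      (fun (acc : List (List Int) × List Int) face =>
        (acc.1 ++ [(face.foldl
            (fun (p : List Int × List Int) v => (p.1 ++ [g v], p.2 ++ [g v]))
            (([] : List Int), acc.2)).1],
         (face.foldl
            (fun (p : List Int × List Int) v => (p.1 ++ [g v], p.2 ++ [g v]))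
            (([] : List Int), acc.2)).2)) (a1, a2)
      = (a1 ++ faces_data.map (fun face => face.map g),
         a2 ++ faces_data.flatMap (fun face => face.map g)) := by
  induction faces_data generalizing a1 a2 with
  | nil => simp
  | cons f t ih =>
    rw [List.foldl_cons, pv_inner_eq, ih]
    simp

-- the running minimum of x::t is an element of x::t and a lower bound for it
theorem pv_foldl_min_mem (t : List Int) (x : Int) : t.foldl min x ∈ x :: t := by
  induction t generalizing x with
  | nil => simp
  | cons a t ih =>
    rw [List.foldl_cons]
    rcases List.mem_cons.1 (ih (min x a)) with h | h
    · rcases min_choice x a with hc | hc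
      · exact List.mem_cons.2 (Or.inl (h.trans hc))
      · exact List.mem_cons.2 (Or.inr (List.mem_cons.2 (Or.inl (h.trans hc))))
    · exact List.mem_cons.2 (Or.inr (List.mem_cons.2 (Or.inr h)))

theorem pv_foldl_min_le (t : List Int) (x : Int) : ∀ y ∈ x :: t, t.foldl min x ≤ y := by
  induction t generalizing x with
  | nil =>
    intro y hy
    rw [List.mem_singleton] at hy
    simp [hy]
  | cons a t ih =>
    intro y hy
    rw [List.foldl_cons]
    rcases List.mem_cons.1 hy with rfl | hy' 
    · exact le_trans (ih (min y a) (min y a) (List.mem_cons_self)) (min_le_left _ _)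
    · rcases List.mem_cons.1 hy' with rfl | hy''
      · exact le_trans (ih (min x y) (min x y) (List.mem_cons_self)) (min_le_right _ _)
      · exact ih (min x a) y (List.mem_cons.2 (Or.inr hy''))

-- the running maximum of x::t is an element of x::t and an upper bound for it
theorem pv_foldl_max_mem (t : List Int) (x : Int) : t.foldl max x ∈ x :: t := by
  induction t generalizing x with
  | nil => simp
  | cons a t ih =>
    rw [List.foldl_cons]
    rcases List.mem_cons.1 (ih (max x a)) with h | h
    · rcases max_choice x a with hc | hc
      · exact List.mem_cons.2 (Or.inl (h.trans hc))
      · exact List.mem_cons.2 (Or.inr (List.mem_cons.2 (Or.inl (h.trans hc))))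
    · exact List.mem_cons.2 (Or.inr (List.mem_cons.2 (Or.inr h)))

theorem pv_foldl_max_ge (t : List Int) (x : Int) : ∀ y ∈ x :: t, y ≤ t.foldl max x := by
  induction t generalizing x with
  | nil =>
    intro y hy
    rw [List.mem_singleton] at hy
    simp [hy]
  | cons a t ih =>
    intro y hy
    rw [List.foldl_cons]
    rcases List.mem_cons.1 hy with rfl | hy'
    · exact le_trans (le_max_left _ _) (ih (max y a) (max y a) (List.mem_cons_self))
    · rcases List.mem_cons.1 hy' with rfl | hy''
      · exact le_trans (le_max_right _ _) (ih (max x y) (max x y) (List.mem_cons_self))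
      · exact ih (max x a) y (List.mem_cons.2 (Or.inr hy''))

-- in a ≤-sorted list every element is at most the last one
theorem pv_pairwise_le_getLast (s : List Int) (hs : s.Pairwise (· ≤ ·)) (h : s ≠ []) :
    ∀ y ∈ s, y ≤ s.getLast h := by
  induction s with
  | nil => exact absurd rfl h
  | cons a t ih =>
    intro y hy
    cases t with
    | nil =>
      rw [List.mem_singleton] at hy
      simp [hy, List.getLast]
    | cons b u =>
      rw [List.getLast_cons (by simp)]
      rcases List.mem_cons.1 hy with rfl | hy'
      · exact (List.pairwise_cons.1 hs).1 _ (List.getLast_mem _)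
      · exact ih (List.pairwise_cons.1 hs).2 (by simp) y hy'

-- running max commutes with the shift v ↦ v - s + m
theorem pv_foldl_max_shift (t : List Int) (x s m : Int) :
    (t.map (fun v => v - s + m)).foldl max (x - s + m) = t.foldl max x - s + m := by
  induction t generalizing x with
  | nil => simp
  | cons a t ih =>
    have h : max (x - s + m) (a - s + m) = max x a - s + m := by omega
    simp [List.foldl_cons, h, ih]

theorem adjust_faces_data_eq (faces_data : List (List Int)) (max_vert_used : Int)
    (hpre : faces_data.flatMap id ≠ []) :
    adjust_faces_data faces_data max_vert_used = adjust_faces_data_alt faces_data max_vert_used := by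
  obtain ⟨x, t, hx⟩ := List.exists_cons_of_ne_nil hpre
  -- the sorted flattened list, its endpoints, and their characterisation
  have hperm : (PySem.List.sorted (x :: t) (fun y => y) false).Perm (x :: t) :=
    PySem.List.sorted_perm ..
  have hsne : PySem.List.sorted (x :: t) (fun y => y) false ≠ [] :=
    fun h0 => List.cons_ne_nil x t ((h0 ▸ hperm).symm.eq_nil)
  obtain ⟨m, r, hsrt⟩ := List.exists_cons_of_ne_nil hsne
  have hpair : (m :: r).Pairwise (· ≤ ·) := by
    rw [← hsrt]
    simpa using PySem.List.sorted_pairwise (xs := x :: t) (key := fun y => y)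
  have hmem : ∀ y : Int, y ∈ m :: r ↔ y ∈ x :: t := fun y => by
    rw [← hsrt]; exact hperm.mem_iff
  -- head of sorted = running min
  have hmin : m = t.foldl min x := by
    have h1 : t.foldl min x ≤ m :=
      pv_foldl_min_le t x m ((hmem m).1 (List.mem_cons_self))
    have h2 : m ≤ t.foldl min x :=
      PySem.List.key_head_sorted_le (x :: t) (fun y => y) hsrt _ (pv_foldl_min_mem t x)
    omega
  -- last of sorted = running max
  have hlast : (m :: r).getLast (List.cons_ne_nil m r) = t.foldl max x := by
    have h1 : (m :: r).getLast (List.cons_ne_nil m r) ≤ t.foldl max x :=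
      pv_foldl_max_ge t x _ ((hmem _).1 (List.getLast_mem _))
    have h2 : t.foldl max x ≤ (m :: r).getLast (List.cons_ne_nil m r) :=
      pv_pairwise_le_getLast (m :: r) hpair (List.cons_ne_nil m r) _
        ((hmem _).2 (pv_foldl_max_mem t x))
    omega
  -- evaluate both ports
  unfold adjust_faces_data adjust_faces_data_alt
  simp only [pv_allv_eq, List.nil_append, hx, PySem.List.min?_id_cons, hsrt,
    PySem.List.pyGet?_zero_cons, PySem.List.pyGet?_neg_one]
  rw [pv_outer_eq, List.nil_append, List.nil_append]
  have hfm : faces_data.flatMap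
      (fun face => face.map (fun v => v - (t.foldl min x - 1) + max_vert_used))
      = (faces_data.flatMap id).map (fun v => v - (t.foldl min x - 1) + max_vert_used) := by
    rw [List.map_flatMap]; simp
  have hgl : (m :: r).getLast? = some ((m :: r).getLast (List.cons_ne_nil m r)) :=
    List.getLast?_eq_some_getLast (List.cons_ne_nil m r)
  rw [hfm, hx, List.map_cons, PySem.List.max?_id_cons, pv_foldl_max_shift, hgl, hlast]
  simp only [Option.getD_some, Prod.mk.injEq]
  constructor
  · apply List.map_congr_left; intro f _
    apply List.map_congr_left; intro v _
    omega
  · omega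

-- ===== VERDICT =====
theorem adjust_faces_data_spec : Claim_equal_adjust_faces_data := by
  intro faces_data max_vert_used _ hpre
  exact adjust_faces_data_eq faces_data max_vert_used hpre
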